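-- pv_equiv track=rewrite | github.com/ervrv/gazprombank_tasks | task_5.py | get_connected_words
-- ===== SOURCE A (Python) =====
-- def get_connected_words(user_word: str, words: tuple[str, ...]) -> list[str]:
--     """
--     Connects user word with words from list
--     if user word ending is equal to beginning of word from list.
--     :param user_word: word inputted by user
--     :param words: tuple of words
--     :return: list of connected words
--     """
--     result = []
--     for word in words:
--         if word != user_word:
--             for i in range(1, len(user_word)):
--                 if word.startswith(user_word[i:]):
--                     result.append(f'{user_word[:i]}{word}')
--     return result
-- ===== SOURCE B (Python) =====
-- def get_connected_words(user_word: str, words: tuple[str, ...]) -> list[str]: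
--     """Connect user_word with each word whose beginning equals a proper suffix
--     of user_word.  One simultaneous scan of word keeps the set of still-viable
--     suffix start positions, instead of an independent slice+startswith test
--     per position."""
--     n = len(user_word)
--     result = []
--     for word in words:
--         if word == user_word:
--             continue
--         # candidate i means: user_word[i:] might be a prefix of word;
--         # candidate i is confirmed at scan position pos when i + pos == n.
--         cands = list(range(1, n))
--         done_per_step = []
--         pos = 0
--         while True:
--             done_per_step.append([i for i in cands if i + pos == n])
--             if pos == len(word) or not cands:
--                 break
--             c = word[pos]
--             cands = [i for i in cands if i + pos < n and user_word[i + pos] == c]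
--             pos += 1
--         # confirmations found later correspond to smaller i: emit i ascending
--         for step in reversed(done_per_step):
--             for i in step:
--                 result.append(user_word[:i] + word)
--     return result
-- ===== Notes on version B (the rewrite author's own statement) =====
-- stated objective: faster
-- what changed: Instead of testing each suffix user_word[i:] independently with a slice plus startswith (O(len(user_word)) work per position per word), B makes one simultaneous left-to-right scan of each word, maintaining the shrinking set of still-viable suffix start positions and recording each position the moment its suffix is fully matched.
import Mathlib
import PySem

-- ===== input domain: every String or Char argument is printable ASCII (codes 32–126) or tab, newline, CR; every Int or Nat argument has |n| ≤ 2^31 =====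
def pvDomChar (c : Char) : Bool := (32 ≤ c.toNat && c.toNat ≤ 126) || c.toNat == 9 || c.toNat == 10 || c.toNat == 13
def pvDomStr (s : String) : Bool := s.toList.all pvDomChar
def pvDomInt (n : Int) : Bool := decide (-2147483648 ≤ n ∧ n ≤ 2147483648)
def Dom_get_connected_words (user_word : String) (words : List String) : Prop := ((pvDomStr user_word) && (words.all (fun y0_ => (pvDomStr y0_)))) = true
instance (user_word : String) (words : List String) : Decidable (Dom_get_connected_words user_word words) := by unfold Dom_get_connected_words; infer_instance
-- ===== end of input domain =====

-- B replaces A's per-position slice+startswith test by one simultaneous scan of each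
-- word that keeps the set of still-viable suffix start positions (alternative algorithm;
-- measurably faster on long user words).

-- ===== PORT A =====
-- literal port of A: for word in words: if word != user_word:
--   for i in range(1, len(user_word)): if word.startswith(user_word[i:]): result.append(f'{user_word[:i]}{word}')
def get_connected_words (user_word : String) (words : List String) : List String :=
  words.foldl (fun result word =>
    if word ≠ user_word then
      (PySem.List.pyRange 1 (PySem.Str.len user_word) 1).foldl (fun res i =>
        if PySem.Chars.startswith word.toList
            (PySem.List.slice user_word.toList (some i) none) then
          res ++ [String.ofList (PySem.List.slice user_word.toList none (some i) ++ word.toList)]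
        else res) result
    else result) []

-- ===== PORT B =====
-- the while-loop of B: one step per character of the word; `cands` is the list of still
-- viable suffix start positions, a candidate i is confirmed when i + pos = n
def pvScan (u : List Char) (n : Nat) (cands : List Nat) (pos : Nat) : List Char → List (List Nat)
  | [] => [cands.filter (fun i => i + pos == n)]
  | c :: wr =>
    let done := cands.filter (fun i => i + pos == n)
    if cands.isEmpty then [done]
    else done :: pvScan u n
      (cands.filter (fun i => decide (i + pos < n) && (u.getD (i + pos) ' ' == c)))
      (pos + 1) wr

def get_connected_words_alt (user_word : String) (words : List String) : List String :=
  let u := user_word.toList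
  let n := u.length
  words.foldl (fun result word =>
    if word = user_word then result
    else
      result ++ (pvScan u n (List.range' 1 (n - 1)) 0 word.toList).reverse.flatMap
        (fun step => step.map (fun i => String.ofList (u.take i ++ word.toList)))) []

-- ===== PRECONDITION & SPEC =====
def Spec_get_connected_words (user_word : String) (words : List String) (out : List String) : Prop := out = get_connected_words_alt user_word words
instance (user_word : String) (words : List String) (out : List String) : Decidable (Spec_get_connected_words user_word words out) := by unfold Spec_get_connected_words; infer_instance

-- ===== CLAIM (what is proved, stated in full; the proofs are below) =====
def Claim_equal_get_connected_words : Prop := ∀ (user_word : String) (words : List String), Dom_get_connected_words user_word words → Spec_get_connected_words user_word words (get_connected_words user_word words)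

-- ===== LEMMAS AND PROOFS =====

-- splitting a filter: if F only holds strictly below m and l is increasing with entries ≤ m,
-- the single element equal to m (if any) is the last one, so it can be split off to the right
lemma pv_filter_or_top (m : Nat) (F : Nat → Bool) (hF : ∀ i, F i = true → i < m) :
    ∀ (l : List Nat), (∀ i ∈ l, i ≤ m) → l.Pairwise (· < ·) →
      l.filter (fun i => F i || i == m) = l.filter F ++ l.filter (fun i => i == m) := by
  intro l
  induction l with
  | nil => intro _ _; rfl
  | cons x t ih =>
    intro hb hs
    have hlt : ∀ y ∈ t, x < y := fun y hy => List.rel_of_pairwise_cons hs hy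
    have hs' : t.Pairwise (· < ·) := hs.of_cons
    have hb' : ∀ i ∈ t, i ≤ m := fun i hi => hb i (List.mem_cons_of_mem _ hi)
    by_cases hx : x = m
    · have ht : t = [] := by
        rcases t with _ | ⟨y, t'⟩
        · rfl
        · exact absurd (hb' y (by simp)) (by have := hlt y (by simp); omega)
      subst ht hx
      have hFm : F x = false := by
        cases h : F x
        · rfl
        · exact absurd (hF x h) (by omega)
      simp [List.filter, hFm]
    · have hxm : (x == m) = false := by simp [hx]
      have step : t.filter (fun i => F i || i == m) = t.filter F ++ t.filter (fun i => i == m) :=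
        ih hb' hs'
      by_cases hFx : F x = true
      · simp [hFx, hxm, step]
      · simp [Bool.eq_false_iff.mpr hFx, hxm, step]

-- correctness of the scan: the reversed concatenation of the confirmation lists is exactly
-- the (in-order) sublist of candidates i whose suffix u[i+pos:] is a prefix of the word
lemma pvScan_correct (u : List Char) :
    ∀ (w : List Char) (pos : Nat) (cands : List Nat),
      (∀ i ∈ cands, i + pos ≤ u.length) → cands.Pairwise (· < ·) →
      (pvScan u u.length cands pos w).reverse.flatten
        = cands.filter (fun i => decide (u.drop (i + pos) <+: w)) := by
  intro w
  induction w with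
  | nil =>
    intro pos cands hb _
    simp only [pvScan, List.reverse_singleton, List.flatten_cons, List.flatten_nil,
      List.append_nil]
    refine List.filter_congr ?_
    intro i hi
    have h1 : i + pos ≤ u.length := hb i hi
    apply Bool.eq_iff_iff.mpr
    simp only [beq_iff_eq, List.prefix_nil, decide_eq_true_eq, List.drop_eq_nil_iff]
    omega
  | cons c wr ih =>
    intro pos cands hb hs
    rcases hemp : cands with _ | ⟨a, rest⟩
    · simp [pvScan]
    rw [← hemp]
    have hne : cands.isEmpty = false := by rw [hemp]; rfl
    have hposle : pos ≤ u.length := by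
      have := hb a (by rw [hemp]; simp)
      omega
    simp only [pvScan, hne, Bool.false_eq_true, if_false, List.reverse_cons, List.flatten_append,
      List.flatten_cons, List.flatten_nil, List.append_nil]
    set A : Nat → Bool := fun i => decide (i + pos < u.length) && (u.getD (i + pos) ' ' == c) with hA
    have hbA : ∀ i ∈ cands.filter A, i + (pos + 1) ≤ u.length := by
      intro i hi
      have := List.of_mem_filter hi
      rw [hA] at this
      simp only [Bool.and_eq_true, decide_eq_true_eq] at this
      omega
    rw [ih (pos + 1) (cands.filter A) hbA (hs.filter A)]
    rw [List.filter_filter]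
    have e1 : cands.filter (fun i => i + pos == u.length)
        = cands.filter (fun i => i == u.length - pos) := by
      refine List.filter_congr ?_
      intro i hi
      have := hb i hi
      apply Bool.eq_iff_iff.mpr
      simp only [beq_iff_eq]
      omega
    rw [e1]
    have hF : ∀ i, ((fun a => decide (List.drop (a + (pos + 1)) u <+: wr) && A a) i) = true →
        i < u.length - pos := by
      intro i h
      simp only [hA, Bool.and_eq_true, decide_eq_true_eq] at h
      omega
    rw [← pv_filter_or_top (u.length - pos)
      (fun a => decide (List.drop (a + (pos + 1)) u <+: wr) && A a) hF cands
      (fun i hi => by have := hb i hi; omega) hs]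
    refine (List.filter_congr ?_).symm
    intro i hi
    have hib : i + pos ≤ u.length := hb i hi
    apply Bool.eq_iff_iff.mpr
    by_cases hlt : i + pos < u.length
    · have hdrop : u.drop (i + pos) = u[i + pos] :: u.drop (i + pos + 1) :=
        List.drop_eq_getElem_cons hlt
      have hget : u.getD (i + pos) ' ' = u[i + pos] := List.getD_eq_getElem u ' ' hlt
      simp only [hA, hdrop, hget, List.cons_prefix_cons, Bool.or_eq_true, Bool.and_eq_true,
        decide_eq_true_eq, beq_iff_eq]
      constructor
      · rintro ⟨h1, h2⟩; exact Or.inl ⟨h2, by omega, h1⟩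
      · rintro (⟨h2, _, h1⟩ | h)
        · exact ⟨h1, h2⟩
        · omega
    · have hdrop : u.drop (i + pos) = [] := by rw [List.drop_eq_nil_iff]; omega
      simp only [hA, hdrop, List.nil_prefix, decide_true, Bool.or_eq_true, Bool.and_eq_true,
        decide_eq_true_eq, beq_iff_eq]
      constructor
      · intro _; exact Or.inr (by omega)
      · intro _; trivial

-- Python's startswith as a decidable prefix test
lemma pv_startswith (s p : List Char) :
    PySem.Chars.startswith s p = decide (p <+: s) := by
  apply Bool.eq_iff_iff.mpr
  simp [PySem.Chars.startswith_iff]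

-- B's flatMap of per-step maps is a map over the flattened steps
lemma pv_flatMap_map {α β : Type} (L : List (List α)) (h : α → β) :
    L.flatMap (fun st => st.map h) = L.flatten.map h := by
  rw [← List.flatMap_id, List.map_flatMap]
  rfl

-- per-word equality of the two inner computations
lemma pv_word_eq (user_word w : String) (res0 : List String) :
    (PySem.List.pyRange 1 (PySem.Str.len user_word) 1).foldl (fun res i =>
        if PySem.Chars.startswith w.toList
            (PySem.List.slice user_word.toList (some i) none) then
          res ++ [String.ofList (PySem.List.slice user_word.toList none (some i) ++ w.toList)]
        else res) res0
      = res0 ++ (pvScan user_word.toList user_word.toList.length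
          (List.range' 1 (user_word.toList.length - 1)) 0 w.toList).reverse.flatMap
          (fun step => step.map (fun i => String.ofList (user_word.toList.take i ++ w.toList))) := by
  rw [PySem.List.foldl_append_if]
  congr 1
  -- right-hand side to canonical form
  rw [pv_flatMap_map]
  rw [pvScan_correct user_word.toList w.toList 0 (List.range' 1 (user_word.toList.length - 1))
    (fun i hi => by have := (List.mem_range'_1).mp hi; omega)
    (List.pairwise_lt_range' 1)]
  rw [List.range'_eq_map_range, List.filter_map, List.map_map]
  -- left-hand side to canonical form
  rw [PySem.Str.len_eq, PySem.List.pyRange_one]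
  have hn : ((user_word.toList.length : Int) - 1).toNat = user_word.toList.length - 1 := by omega
  rw [hn, List.filter_map, List.map_map]
  have hfil : ∀ k : Nat,
      ((fun i => PySem.Chars.startswith w.toList (PySem.List.slice user_word.toList (some i) none))
        ∘ (fun k : Nat => (1 : Int) + ↑k)) k
      = ((fun i => decide (user_word.toList.drop (i + 0) <+: w.toList)) ∘ (fun x : Nat => 1 + x)) k := by
    intro k
    have hcast : (1 : Int) + (k : Int) = ((1 + k : Nat) : Int) := by push_cast; ring
    simp only [Function.comp, hcast, PySem.List.slice_from_natCast, pv_startswith,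
      Nat.add_zero]
  rw [List.filter_congr (fun k _ => hfil k)]
  refine List.map_congr_left ?_
  intro k _
  have hcast : (1 : Int) + (k : Int) = ((1 + k : Nat) : Int) := by push_cast; ring
  simp only [Function.comp, hcast, PySem.List.slice_to_natCast]

-- ===== VERDICT (by name: the statement is the Claim_ definition above) =====
theorem get_connected_words_spec : Claim_equal_get_connected_words := by
  intro user_word words hdom
  clear hdom
  unfold Spec_get_connected_words get_connected_words get_connected_words_alt
  simp only []
  induction words using List.reverseRecOn with
  | nil => rfl
  | append_singleton ws w ih =>
    rw [List.foldl_append, List.foldl_append, ← ih]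
    simp only [List.foldl_cons, List.foldl_nil]
    by_cases hw : w = user_word
    · simp [hw]
    · simp only [hw, ne_eq, not_false_eq_true, if_true, if_false]
      exact pv_word_eq user_word w _
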